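-- pv_equiv track=rewrite | github.com/soiejung/Algorithm | CodeApp/프로그래머스/과일 장수.py | solution
-- ===== SOURCE A (Python) =====
-- def solution(k, m, score):
--     answer = 0
--     score.sort(reverse = True)
--
--     box = len(score) // m
--
--     for b in range(box):
--         lst = []
--         for i in range(m*b,m*b+m,1):
--             lst.append(score[i])
--         min_ = min(lst)
--         answer += min_ * m
--
--     return answer
-- ===== SOURCE B (Python) =====
-- def solution(k, m, score):
--     # Sort in place, descending (same observable mutation as A).
--     score.sort(reverse=True)
--     # Each descending box of m scores has its minimum at its last position,
--     # i.e. at indices m-1, 2m-1, ... : one strided slice replaces A's nested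
--     # loop with its per-box min scan.
--     return m * sum(score[m - 1 :: m])
-- ===== Notes on version B (the rewrite author's own statement) =====
-- stated objective: simpler
-- what changed: The nested loop that copies each box into a list and calls min on it is replaced by one strided slice score[m-1::m] summed and multiplied by m (each descending box's minimum is its last element), removing the per-box list build and min scan.
-- outside the precondition, e.g. on solution(0, -2, [1, 2, 3]): A returns 0, B returns -6; on solution(0, 0, [1]): A raises ZeroDivisionError, B raises ValueError
import Mathlib
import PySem

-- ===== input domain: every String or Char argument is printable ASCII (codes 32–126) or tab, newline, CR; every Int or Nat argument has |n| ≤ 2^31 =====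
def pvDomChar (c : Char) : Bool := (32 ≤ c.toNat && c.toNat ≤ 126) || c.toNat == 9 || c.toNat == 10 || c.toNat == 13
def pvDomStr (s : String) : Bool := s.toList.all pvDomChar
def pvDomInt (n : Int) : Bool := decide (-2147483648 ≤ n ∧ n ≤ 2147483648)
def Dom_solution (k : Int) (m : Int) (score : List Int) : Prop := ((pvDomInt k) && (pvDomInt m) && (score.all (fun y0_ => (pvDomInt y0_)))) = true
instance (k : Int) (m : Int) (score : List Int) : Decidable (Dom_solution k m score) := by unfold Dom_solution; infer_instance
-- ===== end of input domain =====

-- B replaces A's nested per-box loop (build list, take min) by one strided selection of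
-- each box's last element, summed once; objective: simpler. Both sort `score` in place
-- descending (same mutation); the equivalence proved is about the return value.


-- ===== PORT A =====
-- literal port of A: sort descending, box = len // m, for each box copy its m scores
-- into lst, add min(lst) * m.  score[i] and min(lst) never raise inside Pre_ (indices
-- m*b..m*b+m-1 < box*m ≤ len and lst nonempty for m ≥ 1), so the defaults are unreachable.
def solution (k : Int) (m : Int) (score : List Int) : Int :=
  let d := PySem.List.sorted score (fun x => x) true
  let box := PySem.Int.floordiv (d.length : Int) m
  (PySem.List.pyRange 0 box 1).foldl (fun answer b =>
    let lst := (PySem.List.pyRange (m*b) (m*b+m) 1).foldl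
      (fun l i => l ++ [PySem.List.pyGetD d i 0]) []
    let min_ := (PySem.List.min? lst (fun x => x)).getD 0
    answer + min_ * m) 0

-- ===== PORT B =====
-- literal port of B: sort descending, m * sum(score[m-1::m]); the slice never fails for m ≠ 0.
def solution_alt (k : Int) (m : Int) (score : List Int) : Int :=
  let d := PySem.List.sorted score (fun x => x) true
  m * ((PySem.List.slice? d (some (m - 1)) none m).getD []).sum

-- ===== PRECONDITION & SPEC =====
-- Pre_ excludes non-positive box size m (outside the task's natural domain): m = 0 makes
-- both programs raise, and for m < 0 A's value 0 is an artefact of the empty range while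
-- B's backwards slice picks elements.
def Pre_solution (k : Int) (m : Int) (score : List Int) : Prop := 1 ≤ m
instance (k : Int) (m : Int) (score : List Int) : Decidable (Pre_solution k m score) := by
  unfold Pre_solution; infer_instance
def pvWitness_solution : Int × Int × List Int := (4, 3, [1, 2, 3, 1, 2, 3, 1])
def Spec_solution (k : Int) (m : Int) (score : List Int) (out : Int) : Prop := out = solution_alt k m score
instance (k : Int) (m : Int) (score : List Int) (out : Int) : Decidable (Spec_solution k m score out) := by unfold Spec_solution; infer_instance

-- ===== CLAIM (what is proved, stated in full; the proofs are below) =====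
def Claim_equal_solution : Prop := ∀ (k : Int) (m : Int) (score : List Int), Dom_solution k m score → Pre_solution k m score → Spec_solution k m score (solution k m score)

-- ===== LEMMAS AND PROOFS =====

-- elements a+0 .. a+n-1 of xs form the segment (xs.drop a).take n
lemma map_getD_range_eq_drop_take (xs : List Int) (a n : Nat) (h : a + n ≤ xs.length) :
    (List.range n).map (fun t => xs.getD (a + t) 0) = (xs.drop a).take n := by
  apply List.ext_getElem
  · simp; omega
  · intro i h1 h2
    simp at h1 ⊢
    rw [List.getElem?_eq_getElem (by omega)]
    rfl

-- the running min of a descending chain is its last element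
lemma foldl_min_desc : ∀ (t : List Int) (x : Int),
    (x :: t).Pairwise (fun a b => b ≤ a) → t.foldl min x = (x :: t).getLast (by simp) := by
  intro t
  induction t with
  | nil => intro x _; simp
  | cons y t' ih =>
    intro x hp
    have hyx : y ≤ x := (List.pairwise_cons.mp hp).1 y (by simp)
    have hp' : (y :: t').Pairwise (fun a b => b ≤ a) := (List.pairwise_cons.mp hp).2
    have : min x y = y := min_eq_right hyx
    simp only [List.foldl_cons, this]
    rw [ih y hp']
    simp [List.getLast_cons]

lemma min_desc_getD (l : List Int) (h : l ≠ []) (hp : l.Pairwise (fun a b => b ≤ a)) :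
    ((PySem.List.min? l (fun x => x)).getD 0) = l.getLast h := by
  obtain ⟨x, t, rfl⟩ := List.exists_cons_of_ne_nil h
  rw [PySem.List.min?_id_cons]
  simpa using foldl_min_desc t x hp

-- A's value in closed form: the sum of the boxes' last elements times m
lemma solution_closed (k m : Int) (score : List Int) (hm : 1 ≤ m) :
    solution k m score =
      ((List.range ((score.length : Int) / m).toNat).map
        (fun b => (PySem.List.sorted score (fun x => x) true).getD (m.toNat * b + m.toNat - 1) 0 * m)).sum := by
  unfold solution
  dsimp only
  set d := PySem.List.sorted score (fun x => x) true with hd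
  have hlen : d.length = score.length := PySem.List.length_sorted score (fun x => x) true
  have hm0 : (0:Int) < m := by omega
  have hmN : (m.toNat : Int) = m := Int.toNat_of_nonneg (by omega)
  rw [PySem.Int.floordiv_eq_ediv_of_pos hm0, PySem.List.pyRange_one, PySem.List.foldl_add]
  rw [← hlen]
  set boxN := (((d.length : Int)) / m).toNat with hbox
  have hbox' : ((boxN : Int)) = ((d.length : Int)) / m :=
    Int.toNat_of_nonneg (Int.ediv_nonneg (by positivity) (by omega))
  have hmul : m.toNat * boxN ≤ d.length := by
    have h1 : ((d.length : Int)) / m * m ≤ (d.length : Int) := Int.ediv_mul_le _ (by omega)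
    nlinarith [hbox', h1, hmN]
  simp only [List.map_map, zero_add, sub_zero]
  rw [← hbox]
  apply congrArg List.sum
  apply List.map_congr_left
  intro t ht
  have ht' : t < boxN := List.mem_range.mp ht
  have hbd : m.toNat * t + m.toNat ≤ d.length := by
    have : m.toNat * (t + 1) ≤ m.toNat * boxN := Nat.mul_le_mul_left _ (by omega)
    calc m.toNat * t + m.toNat = m.toNat * (t+1) := by ring
    _ ≤ m.toNat * boxN := this
    _ ≤ d.length := hmul
  simp only [Function.comp]
  rw [PySem.List.foldl_append_singleton_eq_map, PySem.List.pyRange_one]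
  have hsub : (m * ↑t + m - m * ↑t).toNat = m.toNat := by
    have h : m * (t:Int) + m - m * (t:Int) = m := by ring
    rw [h]
  rw [hsub, List.nil_append, List.map_map]
  have hmap : (List.range m.toNat).map
      ((fun i => PySem.List.pyGetD d i 0) ∘ fun k => m * ↑t + ↑k)
      = (List.range m.toNat).map (fun k => d.getD (m.toNat * t + k) 0) := by
    apply List.map_congr_left
    intro j _
    have : m * (t : Int) + (j : Int) = ((m.toNat * t + j : Nat) : Int) := by push_cast [hmN]; ring
    simp only [Function.comp, this, PySem.List.pyGetD_natCast]
  rw [hmap, map_getD_range_eq_drop_take d (m.toNat * t) m.toNat hbd]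
  set lst := (d.drop (m.toNat * t)).take m.toNat with hlst
  have hlstlen : lst.length = m.toNat := by
    rw [hlst]; simp; omega
  have hne : lst ≠ [] := by
    intro h; rw [h] at hlstlen; simp at hlstlen; omega
  have hpw : lst.Pairwise (fun a b => b ≤ a) := by
    have hdp : d.Pairwise (fun a b => b ≤ a) := by
      simpa using PySem.List.sorted_pairwise_rev score (fun x => x)
    exact hdp.sublist ((List.take_sublist _ _).trans (List.drop_sublist _ _))
  rw [min_desc_getD lst hne hpw]
  have hidx : m.toNat * t + (lst.length - 1) = m.toNat * t + m.toNat - 1 := by omega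
  have hgl : lst.getLast hne = d[m.toNat * t + m.toNat - 1]'(by omega) := by
    rw [List.getLast_eq_getElem, List.getElem_of_eq hlst, List.getElem_take, List.getElem_drop]
    simp only [hidx]
  rw [hgl, List.getD_eq_getElem d 0 (by omega)]

-- B's value in the same closed form
lemma solution_alt_closed (k m : Int) (score : List Int) (hm : 1 ≤ m) :
    solution_alt k m score =
      ((List.range ((score.length : Int) / m).toNat).map
        (fun b => (PySem.List.sorted score (fun x => x) true).getD (m.toNat * b + m.toNat - 1) 0 * m)).sum := by
  unfold solution_alt
  dsimp only
  set d := PySem.List.sorted score (fun x => x) true with hd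
  have hlen : d.length = score.length := PySem.List.length_sorted score (fun x => x) true
  have hmN : (m.toNat : Int) = m := Int.toNat_of_nonneg (by omega)
  simp only [PySem.List.slice?, PySem.List.sliceIndices]
  rw [if_neg (by omega : ¬ m = 0), if_neg (by omega : ¬ m < 0), if_neg (by omega : ¬ m - 1 < 0),
    if_neg (by omega : ¬ m < 0), if_neg (by omega : ¬ m < 0), if_pos (by omega : 0 < m),
    Option.getD_some]
  rw [← hlen]
  by_cases hc : (m - 1 : Int) < (d.length : Int)
  · rw [min_eq_left (by omega : (m - 1 : Int) ≤ (d.length : Int))]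
    rw [if_pos hc]
    have hcount : ((d.length : Int) - (m - 1) + m - 1) / m = (d.length : Int) / m := by
      congr 1; ring
    rw [hcount]
    set boxN := (((d.length : Int)) / m).toNat with hbox
    have hbox' : ((boxN : Int)) = ((d.length : Int)) / m :=
      Int.toNat_of_nonneg (Int.ediv_nonneg (by positivity) (by omega))
    have hmul : m.toNat * boxN ≤ d.length := by
      have h1 : ((d.length : Int)) / m * m ≤ (d.length : Int) := Int.ediv_mul_le _ (by omega)
      nlinarith [hbox', h1, hmN]
    have hfm : ∀ kk ∈ List.range boxN,
        (fun x => d[(m - 1 + m * (x : Int)).toNat]?) kk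
          = (some ∘ fun b => d.getD (m.toNat * b + m.toNat - 1) 0) kk := by
      intro kk hk
      have hk' : kk < boxN := List.mem_range.mp hk
      have hb : m.toNat * kk + m.toNat ≤ d.length := by
        have h2 : m.toNat * (kk + 1) ≤ m.toNat * boxN := Nat.mul_le_mul_left _ (by omega)
        calc m.toNat * kk + m.toNat = m.toNat * (kk + 1) := by ring
        _ ≤ m.toNat * boxN := h2
        _ ≤ d.length := hmul
      have hp : ((m.toNat * kk : Nat) : Int) = m * (kk : Int) := by push_cast [hmN]; ring
      have hidx : (m - 1 + m * (kk : Int)).toNat = m.toNat * kk + m.toNat - 1 := by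
        rw [← hp]; omega
      simp only [Function.comp, hidx]
      rw [List.getElem?_eq_getElem (by omega)]
      exact congrArg some (List.getD_eq_getElem d 0 (by omega)).symm
    rw [List.filterMap_congr hfm, List.filterMap_eq_map, List.sum_map_mul_right, mul_comm]
  · rw [min_eq_right (by omega : (d.length : Int) ≤ (m - 1 : Int))]
    rw [if_neg (lt_irrefl _)]
    have hz : ((d.length : Int)) / m = 0 := Int.ediv_eq_zero_of_lt (by positivity) (by omega)
    rw [hz]
    simp

-- ===== VERDICT (by name: the statement is the Claim_ definition above) =====
theorem solution_spec : Claim_equal_solution := by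
  intro k m score _ hm
  unfold Spec_solution
  rw [solution_closed k m score hm, solution_alt_closed k m score hm]
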